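-- pv_equiv track=rewrite | github.com/MacMacky/Python-Exercises | codingbat/warmup2.py | string_splosion
-- ===== SOURCE A (Python) =====
-- def string_splosion(string=""):
--     lengtho = len(string)
--     if lengtho == 0:
--         return ""
--     else:
--         new_string = ""
--         for i in range(lengtho + 1):
--             new_string += string[0:i]
--         return new_string
-- ===== SOURCE B (Python) =====
-- def string_splosion(string=""):
--     new_string = ""
--     prefix = ""
--     for ch in string:
--         prefix += ch
--         new_string += prefix
--     return new_string
-- ===== Notes on version B (the rewrite author's own statement) =====
-- stated objective: simpler
-- what changed: Replaces the index loop that re-slices string[0:i] from scratch at every step with a single pass over the characters that maintains a growing prefix accumulator and appends it each iteration, eliminating indices and slicing entirely.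
import Mathlib
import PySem

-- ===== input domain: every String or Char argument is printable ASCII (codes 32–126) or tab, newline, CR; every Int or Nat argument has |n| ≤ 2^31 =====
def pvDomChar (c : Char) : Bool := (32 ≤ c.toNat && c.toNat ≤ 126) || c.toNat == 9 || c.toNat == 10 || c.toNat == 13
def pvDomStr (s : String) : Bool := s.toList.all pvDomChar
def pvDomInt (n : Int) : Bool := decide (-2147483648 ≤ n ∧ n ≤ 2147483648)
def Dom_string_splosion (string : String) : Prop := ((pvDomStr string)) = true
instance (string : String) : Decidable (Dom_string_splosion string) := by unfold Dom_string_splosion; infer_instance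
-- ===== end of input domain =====

-- B replaces A's index loop, which re-slices string[0:i] from scratch at every step, with a single pass over the
-- characters that maintains a growing prefix accumulator (objective: simpler — no indices, no slicing).
-- ===== PORT A =====
def string_splosion (string : String) : String :=
  let lengtho : Int := PySem.Str.len string
  if lengtho = 0 then ""
  else
    String.ofList ((PySem.List.pyRange 0 (lengtho + 1) 1).foldl
      (fun new_string i => new_string ++ PySem.List.slice string.toList (some 0) (some i)) [])

-- ===== PORT B =====
-- state = (prefix, new_string); each step: prefix += ch; new_string += prefix
def string_splosion_alt (string : String) : String :=
  let st := string.toList.foldl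
    (fun (st : List Char × List Char) ch => (st.1 ++ [ch], st.2 ++ (st.1 ++ [ch]))) ([], [])
  String.ofList st.2

-- ===== PRECONDITION & SPEC =====
def Spec_string_splosion (string : String) (out : String) : Prop := out = string_splosion_alt string
instance (string : String) (out : String) : Decidable (Spec_string_splosion string out) := by unfold Spec_string_splosion; infer_instance

-- ===== CLAIM (what is proved, stated in full; the proofs are below) =====
def Claim_equal_string_splosion : Prop := ∀ (string : String), Dom_string_splosion string → Spec_string_splosion string (string_splosion string)

-- ===== LEMMAS AND PROOFS =====

-- proof-only helper: the common value both ports compute, as a last-character-peeling recursion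
def prefRec (cs : List Char) : List Char :=
  if cs = [] then []
  else prefRec cs.dropLast ++ cs
termination_by cs.length
decreasing_by simp only [List.length_dropLast]; exact Nat.sub_lt (List.length_pos_iff.mpr (by assumption)) one_pos

-- A's foldl of the prefix slices cs[0:i] for i = 0..len equals prefRec.
lemma splosion_foldl_eq (cs : List Char) :
    (PySem.List.pyRange 0 ((cs.length : Int) + 1) 1).foldl
      (fun acc i => acc ++ PySem.List.slice cs (some 0) (some i)) [] = prefRec cs := by
  induction cs using prefRec.induct with
  | case1 =>
    rw [prefRec]
    simp [PySem.List.slice]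
  | case2 cs h ih =>
    rw [prefRec]; simp only [h, if_false]
    have hlen : (0:Int) ≤ (cs.length : Int) := by positivity
    rw [PySem.List.pyRange_one_succ_right hlen, List.foldl_append]
    simp only [List.foldl_cons, List.foldl_nil]
    rw [PySem.List.slice_toNat cs le_rfl hlen]
    simp only [Int.toNat_zero, List.drop_zero, Nat.sub_zero, Int.toNat_natCast, List.take_length]
    congr 1
    rw [PySem.List.foldl_congr_mem _ _
      (fun acc i => acc ++ PySem.List.slice cs.dropLast (some 0) (some i)) []
      (by
        intro acc i hi
        rw [PySem.List.mem_pyRange_one] at hi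
        show acc ++ _ = acc ++ _
        rw [PySem.List.slice_toNat cs le_rfl hi.1, PySem.List.slice_toNat cs.dropLast le_rfl hi.1]
        congr 1
        simp only [Int.toNat_zero, List.drop_zero, Nat.sub_zero, List.dropLast_eq_take, List.take_take]
        have hle : i.toNat ≤ cs.length - 1 := by omega
        rw [min_eq_left hle])]
    have hdl : ((cs.dropLast.length : Int) + 1) = (cs.length : Int) := by
      simp only [List.length_dropLast]
      have := List.length_pos_iff.mpr h
      omega
    rw [← hdl, ih]

-- B's character fold, characterised: new_string accumulates the nonempty prefixes p ++ cs.take (i+1).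
lemma splosion_alt_foldl_char (cs : List Char) : ∀ (p o : List Char),
    (cs.foldl (fun (st : List Char × List Char) ch => (st.1 ++ [ch], st.2 ++ (st.1 ++ [ch]))) (p, o)).2
      = o ++ ((List.range cs.length).map (fun i => p ++ cs.take (i + 1))).flatten := by
  induction cs with
  | nil => intro p o; simp
  | cons c cs ih =>
    intro p o
    simp only [List.foldl_cons, ih, List.length_cons, List.range_succ_eq_map, List.map_cons,
      List.map_map, Function.comp_def, List.take_succ_cons, List.flatten_cons, List.append_assoc,
      List.singleton_append, List.take_zero]

-- the flattened prefix list equals prefRec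
lemma flatten_prefixes_eq (cs : List Char) :
    ((List.range cs.length).map (fun i => cs.take (i + 1))).flatten = prefRec cs := by
  induction cs using prefRec.induct with
  | case1 => rw [prefRec]; simp
  | case2 cs h ih =>
    rw [prefRec]; simp only [h, if_false]
    have hm : cs.length = cs.dropLast.length + 1 := by
      have := List.length_pos_iff.mpr h
      simp only [List.length_dropLast]; omega
    rw [hm, List.range_succ, List.map_append, List.flatten_append]
    simp only [List.map_cons, List.map_nil, List.flatten_cons, List.flatten_nil, List.append_nil]
    have hlast : cs.take (cs.dropLast.length + 1) = cs := by
      rw [← hm]; exact List.take_length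
    rw [hlast]
    congr 1
    rw [← ih]
    congr 1
    apply List.map_congr_left
    intro i hi
    rw [List.mem_range] at hi
    rw [List.dropLast_eq_take, List.take_take]
    have hle : i + 1 ≤ cs.length - 1 := by omega
    rw [min_eq_left hle]

-- ===== VERDICT (by name: the statement is the Claim_ definition above) =====
theorem string_splosion_spec : Claim_equal_string_splosion := by
  intro string _
  unfold Spec_string_splosion string_splosion string_splosion_alt
  simp only []
  rw [splosion_alt_foldl_char string.toList [] []]
  by_cases hs : string = ""
  · subst hs; simp [PySem.Str.len]
  · have hne : string.toList ≠ [] := by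
      simpa [String.toList_eq_nil_iff] using hs
    have hlen : (PySem.Str.len string) = (string.toList.length : Int) := by
      simp [PySem.Str.len_eq]
    rw [hlen, if_neg (by simpa using List.length_pos_iff.mpr hne |>.ne')]
    rw [splosion_foldl_eq]
    simp only [List.nil_append]
    rw [flatten_prefixes_eq]
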